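-- pv_equiv track=rewrite | github.com/Reigo666/Leetcode | Python/4.py | solveMaxValid
-- ===== SOURCE A (Python) =====
-- def solveMaxValid(n,right_people_list,qulified):
--
--     l=0
--     r=n
--     #sum_ans是总答对的题数
--     sum_ans=sum(right_people_list)
--     #一共的题数
--     problems=len(right_people_list)
--
--     def check(mid):
--         left=sum_ans
--         for i in range(problems):
--             left-=min(mid,right_people_list[i])
--         if (qulified-1)*(n-mid)>=left:
--             return True
--         else:
--             return False
--     while l<r:
--         mid=(l+r)//2
--         if check(mid):
--             r=mid
--         else:
--             l=mid+1
--     return l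
-- ===== SOURCE B (Python) =====
-- def solveMaxValid(n, right_people_list, qulified):
--     srt = sorted(right_people_list)
--     m = len(srt)
--     prefix = [0]
--     for x in srt:
--         prefix.append(prefix[-1] + x)
--     total = prefix[m]
--
--     def check(mid):
--         # k = number of elements < mid (bisect_left on the sorted copy)
--         lo, hi = 0, m
--         while lo < hi:
--             h = (lo + hi) // 2
--             if srt[h] < mid:
--                 lo = h + 1
--             else:
--                 hi = h
--         covered = prefix[lo] + mid * (m - lo)
--         return (qulified - 1) * (n - mid) >= total - covered
--
--     l, r = 0, n
--     while l < r:
--         mid = (l + r) // 2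
--         if check(mid):
--             r = mid
--         else:
--             l = mid + 1
--     return l
-- ===== Notes on version B (the rewrite author's own statement) =====
-- stated objective: faster
-- what changed: B sorts the list once and builds prefix sums, so each binary-search check computes sum(min(mid,r_i)) by a bisect on the sorted copy in O(log p) instead of A's O(p) scan over the whole list.
import Mathlib
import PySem

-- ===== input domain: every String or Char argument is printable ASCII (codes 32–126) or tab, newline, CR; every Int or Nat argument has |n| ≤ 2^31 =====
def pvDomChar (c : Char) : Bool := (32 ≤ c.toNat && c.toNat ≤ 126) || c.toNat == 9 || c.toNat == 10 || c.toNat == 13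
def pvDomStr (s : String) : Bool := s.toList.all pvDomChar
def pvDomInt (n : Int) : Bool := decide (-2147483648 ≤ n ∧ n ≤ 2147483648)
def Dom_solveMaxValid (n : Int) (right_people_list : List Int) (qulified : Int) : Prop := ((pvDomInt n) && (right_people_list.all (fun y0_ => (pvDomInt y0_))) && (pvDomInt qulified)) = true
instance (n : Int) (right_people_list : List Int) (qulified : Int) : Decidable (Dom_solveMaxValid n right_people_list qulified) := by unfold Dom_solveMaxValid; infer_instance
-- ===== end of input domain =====

-- B replaces A's per-check linear scan by a one-time sort + prefix sums and a bisect
-- inside each check (measured faster on large inputs).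

-- ===== PORT A =====
-- check(mid): left = sum_ans - Σ min(mid, right_people_list[i]); True iff (qulified-1)*(n-mid) >= left
def pvCheckA (n sum_ans problems qulified : Int) (xs : List Int) (mid : Int) : Bool :=
  let left := (PySem.List.pyRange 0 problems).foldl
    (fun left i => left - min mid (PySem.List.pyGetD xs i 0)) sum_ans
  decide ((qulified - 1) * (n - mid) ≥ left)

-- while l < r: mid = (l+r)//2; if check(mid): r = mid else l = mid+1
def pvLoopA (n sum_ans problems qulified : Int) (xs : List Int) (l r : Int) : Int :=
  if h : l < r then
    let mid := PySem.Int.floordiv (l + r) 2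
    if pvCheckA n sum_ans problems qulified xs mid then
      pvLoopA n sum_ans problems qulified xs l mid
    else
      pvLoopA n sum_ans problems qulified xs (mid + 1) r
  else l
termination_by (r - l).toNat
decreasing_by
  all_goals
    have h1 := PySem.Int.floordiv_two_mid_bounds (le_of_lt h)
    have h2 : PySem.Int.floordiv (l + r) 2 < r :=
      (PySem.Int.floordiv_lt_iff_lt_mul (by norm_num)).mpr (by omega)
    omega

def solveMaxValid (n : Int) (right_people_list : List Int) (qulified : Int) : Int :=
  pvLoopA n right_people_list.sum (PySem.List.len right_people_list) qulified right_people_list 0 n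

-- ===== PORT B =====
-- hand-written bisect_left of Source B: while lo < hi: h = (lo+hi)//2; if srt[h] < mid: lo = h+1 else hi = h
def pvBisect (srt : List Int) (mid lo hi : Int) : Int :=
  if h : lo < hi then
    let hm := PySem.Int.floordiv (lo + hi) 2
    if PySem.List.pyGetD srt hm 0 < mid then
      pvBisect srt mid (hm + 1) hi
    else
      pvBisect srt mid lo hm
  else lo
termination_by (hi - lo).toNat
decreasing_by
  all_goals
    have h1 := PySem.Int.floordiv_two_mid_bounds (le_of_lt h)
    have h2 : PySem.Int.floordiv (lo + hi) 2 < hi :=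
      (PySem.Int.floordiv_lt_iff_lt_mul (by norm_num)).mpr (by omega)
    omega

-- check(mid) of Source B: covered = prefix[lo] + mid*(m-lo); True iff (qulified-1)*(n-mid) >= total - covered
def pvCheckB (n total qulified : Int) (srt pfx : List Int) (m : Int) (mid : Int) : Bool :=
  let lo := pvBisect srt mid 0 m
  let covered := PySem.List.pyGetD pfx lo 0 + mid * (m - lo)
  decide ((qulified - 1) * (n - mid) ≥ total - covered)

def pvLoopB (n total qulified : Int) (srt pfx : List Int) (m : Int) (l r : Int) : Int :=
  if h : l < r then
    let mid := PySem.Int.floordiv (l + r) 2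
    if pvCheckB n total qulified srt pfx m mid then
      pvLoopB n total qulified srt pfx m l mid
    else
      pvLoopB n total qulified srt pfx m (mid + 1) r
  else l
termination_by (r - l).toNat
decreasing_by
  all_goals
    have h1 := PySem.Int.floordiv_two_mid_bounds (le_of_lt h)
    have h2 : PySem.Int.floordiv (l + r) 2 < r :=
      (PySem.Int.floordiv_lt_iff_lt_mul (by norm_num)).mpr (by omega)
    omega

def solveMaxValid_alt (n : Int) (right_people_list : List Int) (qulified : Int) : Int :=
  let srt := PySem.List.sorted right_people_list (fun x => x)
  let m := PySem.List.len srt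
  -- prefix = [0]; for x in srt: prefix.append(prefix[-1] + x)
  let pfx := srt.foldl (fun p x => p ++ [PySem.List.pyGetD p (-1) 0 + x]) [0]
  let total := PySem.List.pyGetD pfx m 0
  pvLoopB n total qulified srt pfx m 0 n

-- ===== PRECONDITION & SPEC =====
def Spec_solveMaxValid (n : Int) (right_people_list : List Int) (qulified : Int) (out : Int) : Prop := out = solveMaxValid_alt n right_people_list qulified
instance (n : Int) (right_people_list : List Int) (qulified : Int) (out : Int) : Decidable (Spec_solveMaxValid n right_people_list qulified out) := by unfold Spec_solveMaxValid; infer_instance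

-- ===== CLAIM (what is proved, stated in full; the proofs are below) =====
def Claim_equal_solveMaxValid : Prop := ∀ (n : Int) (right_people_list : List Int) (qulified : Int), Dom_solveMaxValid n right_people_list qulified → Spec_solveMaxValid n right_people_list qulified (solveMaxValid n right_people_list qulified)

-- ===== LEMMAS AND PROOFS =====

-- Python's prefix[-1] on a list just extended by append
lemma pvGetD_neg_one_append (l : List Int) (c : Int) :
    PySem.List.pyGetD (l ++ [c]) (-1) 0 = c := by
  simp [PySem.List.pyGetD, PySem.List.pyGet?, PySem.List.pyIdx?]

-- the prefix-building loop of Source B produces the running sums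
lemma pvPrefix_foldl (s : List Int) : ∀ (acc : List Int) (l : List Int) (c : Int), acc = l ++ [c] →
    s.foldl (fun p x => p ++ [PySem.List.pyGetD p (-1) 0 + x]) acc
      = acc ++ (List.range s.length).map (fun j => c + (s.take (j+1)).sum) := by
  induction s with
  | nil => intro acc l c h; simp
  | cons x t ih =>
    intro acc l c h
    subst h
    rw [List.foldl_cons, pvGetD_neg_one_append,
      ih ((l ++ [c]) ++ [c + x]) (l ++ [c]) (c + x) rfl]
    simp [List.range_succ_eq_map, List.map_map, Function.comp_def, add_assoc, List.append_assoc]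

lemma pvPrefix_getD (s : List Int) (k : Nat) (hk : k ≤ s.length) :
    PySem.List.pyGetD (s.foldl (fun p x => p ++ [PySem.List.pyGetD p (-1) 0 + x]) [0]) (k : Int) 0
      = (s.take k).sum := by
  rw [pvPrefix_foldl s [0] [] 0 rfl]
  rw [PySem.List.pyGetD_eq_getElem _ _ (by positivity) (by simp; omega)]
  cases k with
  | zero => simp
  | succ j =>
    simp only [Int.toNat_natCast]
    rw [List.getElem_append_right (by simp)]
    simp

-- the bisect loop returns a split point of the sorted list
lemma pvBisect_spec (s : List Int) (mid : Int) (hs : s.Pairwise (· ≤ ·)) :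
    ∀ fuel : Nat, ∀ lo hi : Int, (hi - lo).toNat ≤ fuel →
    0 ≤ lo → lo ≤ hi → hi ≤ (s.length : Int) →
    (∀ j : Nat, (j : Int) < lo → ∀ hj : j < s.length, s[j] < mid) →
    (∀ j : Nat, hi ≤ (j : Int) → ∀ hj : j < s.length, mid ≤ s[j]) →
    lo ≤ pvBisect s mid lo hi ∧ pvBisect s mid lo hi ≤ hi ∧
      (∀ j : Nat, (j : Int) < pvBisect s mid lo hi → ∀ hj : j < s.length, s[j] < mid) ∧
      (∀ j : Nat, pvBisect s mid lo hi ≤ (j : Int) → ∀ hj : j < s.length, mid ≤ s[j]) := by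
  intro fuel
  induction fuel with
  | zero =>
    intro lo hi hf h0 hlh hhl hlow hhigh
    have heq : ¬ lo < hi := by omega
    rw [pvBisect]
    simp only [dif_neg heq]
    exact ⟨le_rfl, hlh, hlow, fun j hj => hhigh j (by omega)⟩
  | succ f ih =>
    intro lo hi hf h0 hlh hhl hlow hhigh
    rw [pvBisect]
    by_cases hlt : lo < hi
    · simp only [dif_pos hlt]
      have hb := PySem.Int.floordiv_two_mid_bounds (le_of_lt hlt)
      have h2 : PySem.Int.floordiv (lo + hi) 2 < hi :=
        (PySem.Int.floordiv_lt_iff_lt_mul (by norm_num)).mpr (by omega)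
      set hm := PySem.Int.floordiv (lo + hi) 2 with hhm
      have hmlen : hm.toNat < s.length := by omega
      have hget : PySem.List.pyGetD s hm 0 = s[hm.toNat] :=
        PySem.List.pyGetD_eq_getElem s 0 (by omega) (by omega)
      have mono := List.pairwise_iff_getElem.mp hs
      by_cases hc : PySem.List.pyGetD s hm 0 < mid
      · simp only [if_pos hc]
        refine ih (hm + 1) hi (by omega) (by omega) (by omega) (by omega) ?_ hhigh |>.imp (by omega) (fun x => x)
        intro j hj hjl
        by_cases hjm : j = hm.toNat
        · subst hjm; rw [← hget]; exact hc
        · have hjlt : j < hm.toNat := by omega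
          exact lt_of_le_of_lt (mono j hm.toNat hjl hmlen hjlt) (hget ▸ hc)
      · simp only [if_neg hc]
        refine ih lo hm (by omega) h0 (by omega) (by omega) hlow ?_ |>.imp (fun x => x) (fun x => x.imp (by omega) (fun y => y))
        intro j hj hjl
        have hmge : mid ≤ s[hm.toNat] := by rw [← hget]; omega
        by_cases hjm : j = hm.toNat
        · subst hjm; exact hmge
        · have : hm.toNat < j := by omega
          exact le_trans hmge (mono hm.toNat j hmlen hjl this)
    · simp only [dif_neg hlt]
      exact ⟨le_rfl, hlh, hlow, fun j hj => hhigh j (by omega)⟩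

-- A's subtracting loop is sum_ans minus the sum of the minima
lemma pvFoldl_sub_min (s : List Int) (mid : Int) : ∀ a : Int,
    s.foldl (fun acc x => acc - min mid x) a = a - (s.map (fun x => min mid x)).sum := by
  induction s with
  | nil => intro a; simp
  | cons x t ih => intro a; simp [ih]; ring

-- sum of min(mid, ·) splits at the bisect point on a sorted list
lemma pvSumMin_split (s : List Int) (mid : Int) (k : Nat) (hk : k ≤ s.length)
    (hlt : ∀ j : Nat, (j : Int) < (k : Int) → ∀ hj : j < s.length, s[j] < mid)
    (hge : ∀ j : Nat, (k : Int) ≤ (j : Int) → ∀ hj : j < s.length, mid ≤ s[j]) :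
    (s.map (fun x => min mid x)).sum = (s.take k).sum + mid * ((s.length : Int) - k) := by
  conv_lhs => rw [← List.take_append_drop k s]
  rw [List.map_append, List.sum_append]
  congr 1
  · rw [List.map_congr_left (g := fun x => x) ?_]
    · simp
    intro x hx
    obtain ⟨i, hi, rfl⟩ := List.mem_iff_getElem.mp hx
    rw [List.getElem_take]
    have hil : i < s.length := by have := List.length_take_le k s; omega
    have : i < k := by have := hi; simp [List.length_take] at this; omega
    exact min_eq_right (le_of_lt (hlt i (by exact_mod_cast this) hil))
  · rw [List.map_congr_left (g := fun _ => mid) ?_]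
    · rw [List.map_const', List.sum_replicate, List.length_drop, nsmul_eq_mul]
      push_cast [Nat.cast_sub hk]
      ring
    · intro x hx
      obtain ⟨i, hi, rfl⟩ := List.mem_iff_getElem.mp hx
      rw [List.getElem_drop]
      have hil : k + i < s.length := by simp [List.length_drop] at hi; omega
      exact min_eq_left (hge (k + i) (by push_cast; omega) hil)

-- A's check equals B's check for every mid
lemma pvCheck_eq (n qulified : Int) (xs : List Int) (mid : Int) :
    pvCheckA n xs.sum (PySem.List.len xs) qulified xs mid
      = pvCheckB n
          (PySem.List.pyGetD ((PySem.List.sorted xs (fun x => x)).foldl (fun p x => p ++ [PySem.List.pyGetD p (-1) 0 + x]) [0]) (PySem.List.len (PySem.List.sorted xs (fun x => x))) 0)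
          qulified (PySem.List.sorted xs (fun x => x))
          ((PySem.List.sorted xs (fun x => x)).foldl (fun p x => p ++ [PySem.List.pyGetD p (-1) 0 + x]) [0])
          (PySem.List.len (PySem.List.sorted xs (fun x => x))) mid := by
  set s := PySem.List.sorted xs (fun x => x) with hsdef
  have hperm : s.Perm xs := PySem.List.sorted_perm xs (fun x => x) false
  have hpair : s.Pairwise (· ≤ ·) := PySem.List.sorted_pairwise xs (fun x => x)
  have hlen : s.length = xs.length := hperm.length_eq
  have hlenI : PySem.List.len s = (s.length : Int) := by simp [PySem.List.len]
  have hlenxs : PySem.List.len xs = (xs.length : Int) := by simp [PySem.List.len]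
  -- the bisect split point
  have hk := pvBisect_spec s mid hpair ((PySem.List.len s - 0).toNat) 0 (PySem.List.len s)
    le_rfl le_rfl (by simp) (by rw [hlenI])
    (fun j hj => by omega) (fun j hj hjl => by rw [hlenI] at hj; omega)
  set k := pvBisect s mid 0 (PySem.List.len s) with hkdef
  obtain ⟨hk0, hkm, hklt, hkge⟩ := hk
  have hkN : ((k.toNat : Nat) : Int) = k := by omega
  have hkle : k.toNat ≤ s.length := by rw [hlenI] at hkm; omega
  -- A's left value
  have hA : (PySem.List.pyRange 0 (PySem.List.len xs)).foldl
      (fun left i => left - min mid (PySem.List.pyGetD xs i 0)) xs.sum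
      = xs.sum - (xs.map (fun x => min mid x)).sum := by
    have h1 := PySem.List.foldl_pyRange_pyGetD xs 0 (fun acc x => acc - min mid x) xs.sum (a := 0) le_rfl
    simpa using h1.trans (pvFoldl_sub_min xs mid xs.sum)
  -- B's pieces
  have htotal : PySem.List.pyGetD (s.foldl (fun p x => p ++ [PySem.List.pyGetD p (-1) 0 + x]) [0]) (PySem.List.len s) 0 = xs.sum := by
    rw [hlenI, pvPrefix_getD s s.length le_rfl, List.take_length]
    exact hperm.sum_eq
  have hpfx : PySem.List.pyGetD (s.foldl (fun p x => p ++ [PySem.List.pyGetD p (-1) 0 + x]) [0]) k 0 = (s.take k.toNat).sum := by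
    rw [← hkN]
    exact pvPrefix_getD s k.toNat hkle
  have hsplit : (s.map (fun x => min mid x)).sum = (s.take k.toNat).sum + mid * ((s.length : Int) - k.toNat) := by
    refine pvSumMin_split s mid k.toNat hkle ?_ ?_
    · intro j hj hjl; exact hklt j (by omega) hjl
    · intro j hj hjl; exact hkge j (by omega) hjl
  have hsummin : (s.map (fun x => min mid x)).sum = (xs.map (fun x => min mid x)).sum :=
    (hperm.map (fun x => min mid x)).sum_eq
  -- both sides decide the same inequality
  have hx : (List.map (fun x => min mid x) xs).sum
      = (List.take k.toNat s).sum + mid * ((s.length : Int) - k) := by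
    rw [← hsummin, hsplit, hkN]
  unfold pvCheckA pvCheckB
  rw [← hkdef]
  show decide ((qulified - 1) * (n - mid) ≥ (PySem.List.pyRange 0 (PySem.List.len xs)).foldl (fun left i => left - min mid (PySem.List.pyGetD xs i 0)) xs.sum)
      = decide ((qulified - 1) * (n - mid) ≥ PySem.List.pyGetD (s.foldl (fun p x => p ++ [PySem.List.pyGetD p (-1) 0 + x]) [0]) (PySem.List.len s) 0 - (PySem.List.pyGetD (s.foldl (fun p x => p ++ [PySem.List.pyGetD p (-1) 0 + x]) [0]) k 0 + mid * (PySem.List.len s - k)))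
  rw [hA, htotal, hpfx, hlenI, hx]

-- the two binary-search loops coincide once the checks do
lemma pvLoops_eq (n qulified : Int) (xs : List Int) :
    ∀ fuel : Nat, ∀ l r : Int, (r - l).toNat ≤ fuel →
    pvLoopA n xs.sum (PySem.List.len xs) qulified xs l r
      = pvLoopB n
          (PySem.List.pyGetD ((PySem.List.sorted xs (fun x => x)).foldl (fun p x => p ++ [PySem.List.pyGetD p (-1) 0 + x]) [0]) (PySem.List.len (PySem.List.sorted xs (fun x => x))) 0)
          qulified (PySem.List.sorted xs (fun x => x))
          ((PySem.List.sorted xs (fun x => x)).foldl (fun p x => p ++ [PySem.List.pyGetD p (-1) 0 + x]) [0])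
          (PySem.List.len (PySem.List.sorted xs (fun x => x))) l r := by
  intro fuel
  induction fuel with
  | zero =>
    intro l r hf
    have hnlt : ¬ l < r := by omega
    rw [pvLoopA, pvLoopB]
    simp only [dif_neg hnlt]
  | succ f ih =>
    intro l r hf
    rw [pvLoopA, pvLoopB]
    by_cases hlt : l < r
    · simp only [dif_pos hlt]
      have hb := PySem.Int.floordiv_two_mid_bounds (le_of_lt hlt)
      have h2 : PySem.Int.floordiv (l + r) 2 < r :=
        (PySem.Int.floordiv_lt_iff_lt_mul (by norm_num)).mpr (by omega)
      rw [← pvCheck_eq n qulified xs (PySem.Int.floordiv (l + r) 2)]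
      by_cases hc : pvCheckA n xs.sum (PySem.List.len xs) qulified xs (PySem.Int.floordiv (l + r) 2)
      · simp only [hc, if_true]
        exact ih l (PySem.Int.floordiv (l + r) 2) (by omega)
      · simp only [Bool.not_eq_true] at hc
        simp only [hc, Bool.false_eq_true, if_false]
        exact ih (PySem.Int.floordiv (l + r) 2 + 1) r (by omega)
    · simp only [dif_neg hlt]

-- ===== VERDICT (by name: the statement is the Claim_ definition above) =====
theorem solveMaxValid_spec : Claim_equal_solveMaxValid := by
  intro n xs q _
  unfold Spec_solveMaxValid solveMaxValid solveMaxValid_alt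
  exact pvLoops_eq n q xs (n - 0).toNat 0 n le_rfl
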